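-- pv_equiv track=rewrite | github.com/szywind/switchyard | switchyard/sys.py | __gather_link_characteristics
-- ===== SOURCE A (Python) =====
-- def __gather_link_characteristics(cmdargs):
--     settings = {'capacity': None, 'delay':None}
--     currsetting = ''
--     currval = []
--     while len(cmdargs):
--         cmdval = cmdargs.pop(0)
--         if cmdval == 'bw' or 'bandwidth'.startswith(cmdval) or 'capacity'.startswith(cmdval):
--             if currsetting:
--                 settings[currsetting] = ' '.join(currval)
--             currval = []
--             currsetting = 'capacity'
--         elif 'delay'.startswith(cmdval):
--             if currsetting:
--                 settings[currsetting] = ' '.join(currval)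
--             currval = []
--             currsetting = 'delay'
--         else:
--             currval.append(cmdval)
--     if currsetting:
--         settings[currsetting] = ' '.join(currval)
--     return settings
-- ===== SOURCE B (Python) =====
-- def __gather_link_characteristics(cmdargs):
--     # Two-pass: split tokens into keyword-led segments, then assign each segment (last wins).
--     # Like the original, this empties cmdargs in place.
--     def keyword(tok):
--         if tok == 'bw' or 'bandwidth'.startswith(tok) or 'capacity'.startswith(tok):
--             return 'capacity'
--         if 'delay'.startswith(tok):
--             return 'delay'
--         return None
--     toks = list(cmdargs)
--     cmdargs.clear()
--     segments = []
--     for t in toks: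
--         k = keyword(t)
--         if k is not None:
--             segments.append((k, []))
--         elif segments:
--             segments[-1][1].append(t)
--     settings = {'capacity': None, 'delay': None}
--     for k, vals in segments:
--         settings[k] = ' '.join(vals)
--     return settings
-- ===== Notes on version B (the rewrite author's own statement) =====
-- stated objective: faster
-- what changed: Replaced the single-pass state machine that destructively pops tokens from the front (current setting + accumulating value list with flush-on-keyword) by a two-pass decomposition over a copy: one pass splits the tokens into keyword-led segments, a second pass assigns each segment to the settings dict (last wins); cmdargs is still emptied to preserve the side effect.
import Mathlib
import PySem

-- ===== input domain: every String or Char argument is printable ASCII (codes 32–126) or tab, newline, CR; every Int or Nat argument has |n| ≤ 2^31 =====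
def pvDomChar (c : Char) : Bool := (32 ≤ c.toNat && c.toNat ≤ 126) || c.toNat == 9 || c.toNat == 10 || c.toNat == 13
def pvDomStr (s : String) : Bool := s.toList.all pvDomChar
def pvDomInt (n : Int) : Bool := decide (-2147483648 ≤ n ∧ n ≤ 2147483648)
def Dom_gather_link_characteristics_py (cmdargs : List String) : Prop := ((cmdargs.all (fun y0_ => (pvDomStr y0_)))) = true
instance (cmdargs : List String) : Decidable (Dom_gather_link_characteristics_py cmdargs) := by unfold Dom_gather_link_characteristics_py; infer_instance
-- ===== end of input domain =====

-- B replaces A's pop(0)-driven state machine (quadratic list shifting) by a linear two-pass split into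
-- keyword-led segments then last-wins assignment; return-value equivalence is what is proved here
-- (both implementations leave cmdargs empty, A by pop(0), B by clear()).


-- ===== PORT A =====
-- while len(cmdargs): pop(0) … — structural recursion on the list with state (settings, currsetting, currval)
def pvGoA : List String → PySem.Dict String (Option String) → String → List String → PySem.Dict String (Option String)
  | [], settings, currsetting, currval =>
      if currsetting ≠ "" then settings.insert currsetting (some (PySem.Str.join " " currval)) else settings
  | cmdval :: rest, settings, currsetting, currval =>
      if cmdval == "bw" || PySem.Str.startswith "bandwidth" cmdval || PySem.Str.startswith "capacity" cmdval then
        pvGoA rest (if currsetting ≠ "" then settings.insert currsetting (some (PySem.Str.join " " currval)) else settings) "capacity" []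
      else if PySem.Str.startswith "delay" cmdval then
        pvGoA rest (if currsetting ≠ "" then settings.insert currsetting (some (PySem.Str.join " " currval)) else settings) "delay" []
      else
        pvGoA rest settings currsetting (currval ++ [cmdval])

def gather_link_characteristics_py (cmdargs : List String) : List (String × Option String) :=
  (pvGoA cmdargs (PySem.Dict.ofList [("capacity", (none : Option String)), ("delay", none)]) "" []).items

-- ===== PORT B =====
def pvKeyword? (tok : String) : Option String :=
  if tok == "bw" || PySem.Str.startswith "bandwidth" tok || PySem.Str.startswith "capacity" tok then some "capacity"
  else if PySem.Str.startswith "delay" tok then some "delay"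
  else none

-- segments[-1][1].append(t): append t to the value list of the last segment
def pvAppendLast : List (String × List String) → String → List (String × List String)
  | [], _ => []
  | [(k, vs)], t => [(k, vs ++ [t])]
  | s :: rest, t => s :: pvAppendLast rest t

-- first pass: split the tokens into keyword-led segments (tokens before the first keyword are dropped)
def pvBuildSegs : List String → List (String × List String) → List (String × List String)
  | [], segs => segs
  | t :: rest, segs =>
      match pvKeyword? t with
      | some k => pvBuildSegs rest (segs ++ [(k, [])])
      | none => if segs.isEmpty then pvBuildSegs rest segs else pvBuildSegs rest (pvAppendLast segs t)

-- second pass: settings[k] = ' '.join(vals) for each segment, last wins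
def pvAssign (segs : List (String × List String)) (d : PySem.Dict String (Option String)) : PySem.Dict String (Option String) :=
  segs.foldl (fun d p => d.insert p.1 (some (PySem.Str.join " " p.2))) d

def gather_link_characteristics_py_alt (cmdargs : List String) : List (String × Option String) :=
  (pvAssign (pvBuildSegs cmdargs []) (PySem.Dict.ofList [("capacity", (none : Option String)), ("delay", none)])).items

-- ===== PRECONDITION & SPEC =====
def Spec_gather_link_characteristics_py (cmdargs : List String) (out : List (String × Option String)) : Prop := out = gather_link_characteristics_py_alt cmdargs
instance (cmdargs : List String) (out : List (String × Option String)) : Decidable (Spec_gather_link_characteristics_py cmdargs out) := by unfold Spec_gather_link_characteristics_py; infer_instance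

-- ===== CLAIM (what is proved, stated in full; the proofs are below) =====
def Claim_equal_gather_link_characteristics_py : Prop := ∀ (cmdargs : List String), Dom_gather_link_characteristics_py cmdargs → Spec_gather_link_characteristics_py cmdargs (gather_link_characteristics_py cmdargs)

-- ===== LEMMAS AND PROOFS =====

-- the pending segment of A's state (currsetting, currval)
def pvPend (currsetting : String) (currval : List String) : List (String × List String) :=
  if currsetting ≠ "" then [(currsetting, currval)] else []

theorem pvAppendLast_append (s₁ s₂ : List (String × List String)) (t : String) (h : s₂ ≠ []) :
    pvAppendLast (s₁ ++ s₂) t = s₁ ++ pvAppendLast s₂ t := by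
  induction s₁ with
  | nil => rfl
  | cons hd tl ih =>
      cases tl with
      | nil => cases s₂ with
        | nil => exact absurd rfl h
        | cons a b => rfl
      | cons h2 t2 => simpa [pvAppendLast] using ih

theorem pvBuildSegs_append (toks : List String) (s₁ s₂ : List (String × List String)) (h : s₂ ≠ []) :
    pvBuildSegs toks (s₁ ++ s₂) = s₁ ++ pvBuildSegs toks s₂ := by
  induction toks generalizing s₂ with
  | nil => rfl
  | cons t rest ih =>
      simp only [pvBuildSegs]
      cases hk : pvKeyword? t with
      | some k =>
          show pvBuildSegs rest (s₁ ++ s₂ ++ [(k, [])]) = s₁ ++ pvBuildSegs rest (s₂ ++ [(k, [])])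
          rw [List.append_assoc]
          exact ih (s₂ ++ [(k, [])]) (by simp)
      | none =>
          have h1 : (s₁ ++ s₂).isEmpty = false := by
            simp [h]
          have h2 : s₂.isEmpty = false := by simp [h]
          show (if (s₁ ++ s₂).isEmpty = true then pvBuildSegs rest (s₁ ++ s₂) else pvBuildSegs rest (pvAppendLast (s₁ ++ s₂) t))
              = s₁ ++ if s₂.isEmpty = true then pvBuildSegs rest s₂ else pvBuildSegs rest (pvAppendLast s₂ t)
          rw [h1, h2]
          simp only [Bool.false_eq_true, if_false]
          rw [pvAppendLast_append s₁ s₂ t h]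
          exact ih (pvAppendLast s₂ t) (by cases s₂ with
            | nil => exact absurd rfl h
            | cons a b => cases b with
              | nil => obtain ⟨k, vs⟩ := a; simp [pvAppendLast]
              | cons c d => simp [pvAppendLast])

theorem pvAssign_append (s₁ s₂ : List (String × List String)) (d : PySem.Dict String (Option String)) :
    pvAssign (s₁ ++ s₂) d = pvAssign s₂ (pvAssign s₁ d) := by
  simp [pvAssign, List.foldl_append]

theorem pvGoA_eq_assign_build (toks : List String) (d : PySem.Dict String (Option String))
    (currsetting : String) (currval : List String) :
    pvGoA toks d currsetting currval = pvAssign (pvBuildSegs toks (pvPend currsetting currval)) d := by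
  induction toks generalizing d currsetting currval with
  | nil =>
      by_cases hcs : currsetting = ""
      · simp [pvGoA, pvBuildSegs, pvPend, pvAssign, hcs]
      · simp [pvGoA, pvBuildSegs, pvPend, pvAssign, hcs]
  | cons t rest ih =>
      have hd : ∀ (k : String), (if currsetting ≠ "" then d.insert currsetting (some (PySem.Str.join " " currval)) else d)
          = pvAssign (pvPend currsetting currval) d := by
        intro _
        by_cases hcs : currsetting = "" <;> simp [pvPend, pvAssign, hcs]
      simp only [pvGoA]
      by_cases h1 : (t == "bw" || PySem.Str.startswith "bandwidth" t || PySem.Str.startswith "capacity" t) = true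
      · have hk : pvKeyword? t = some "capacity" := by unfold pvKeyword?; rw [if_pos h1]
        rw [if_pos h1, ih, hd "capacity"]
        show _ = pvAssign (pvBuildSegs (t :: rest) (pvPend currsetting currval)) d
        simp only [pvBuildSegs, hk]
        rw [pvBuildSegs_append rest (pvPend currsetting currval) [("capacity", [])] (by simp),
            pvAssign_append]
        rfl
      · rw [if_neg h1]
        by_cases h2 : PySem.Str.startswith "delay" t = true
        · have hk : pvKeyword? t = some "delay" := by unfold pvKeyword?; rw [if_neg h1, if_pos h2]
          rw [if_pos h2, ih, hd "delay"]
          show _ = pvAssign (pvBuildSegs (t :: rest) (pvPend currsetting currval)) d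
          simp only [pvBuildSegs, hk]
          rw [pvBuildSegs_append rest (pvPend currsetting currval) [("delay", [])] (by simp),
              pvAssign_append]
          rfl
        · have hk : pvKeyword? t = none := by unfold pvKeyword?; rw [if_neg h1, if_neg h2]
          rw [if_neg h2, ih]
          show _ = pvAssign (pvBuildSegs (t :: rest) (pvPend currsetting currval)) d
          simp only [pvBuildSegs, hk]
          by_cases hcs : currsetting = ""
          · simp [pvPend, hcs]
          · have : pvPend currsetting currval ≠ [] := by simp [pvPend, hcs]
            have he : (pvPend currsetting currval).isEmpty = false := by
              simp [pvPend, hcs]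
            rw [he]
            simp only [Bool.false_eq_true, if_false]
            congr 1
            simp [pvPend, hcs, pvAppendLast]

-- ===== VERDICT (by name: the statement is the Claim_ definition above) =====
theorem gather_link_characteristics_py_spec : Claim_equal_gather_link_characteristics_py := by
  intro cmdargs _
  show gather_link_characteristics_py cmdargs = gather_link_characteristics_py_alt cmdargs
  unfold gather_link_characteristics_py gather_link_characteristics_py_alt
  rw [pvGoA_eq_assign_build]
  rfl
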